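-- pv_equiv track=rewrite | github.com/SU10KAZ/PDF-proverka | blocks.py | _normalize_block_id
-- ===== SOURCE A (Python) =====
-- def _normalize_block_id(raw: str | None) -> str:
--     """Canonical bare block_id: 'block_IMG-001.png' → 'IMG-001'."""
--     if not raw:
--         return ""
--     s = raw.strip()
--     if s.startswith("block_"):
--         s = s[6:]
--     for ext in (".png", ".jpg", ".jpeg", ".webp"):
--         if s.lower().endswith(ext):
--             s = s[:-len(ext)]
--             break
--     return s
-- ===== SOURCE B (Python) =====
-- _REV_EXTS = tuple(("." + e)[::-1] for e in ("png", "jpg", "jpeg", "webp"))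
-- _PREFIXES = tuple(e[:k] for e in _REV_EXTS for k in range(1, len(e) + 1))
--
--
-- def _scan(p, rev):
--     """Walk the reversed string through the prefix set of the reversed
--     extensions; return the matched extension's length, or None."""
--     if not rev:
--         return None
--     p2 = p + rev[0].lower()
--     if p2 not in _PREFIXES:
--         return None
--     if p2 in _REV_EXTS:
--         return len(p2)
--     return _scan(p2, rev[1:])
--
--
-- def _normalize_block_id(raw):
--     """Canonical bare block_id: 'block_IMG-001.png' -> 'IMG-001'."""
--     if not raw:
--         return ""
--     s = raw.strip()
--     if s.startswith("block_"):
--         s = s[6:]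
--     k = _scan("", s[::-1])
--     return s if k is None else s[:len(s) - k]
-- ===== Notes on version B (the rewrite author's own statement) =====
-- stated objective: alternative
-- what changed: Replaces the loop of four end-anchored endswith tests by a single right-to-left character scan driven by a precomputed prefix-set automaton over the reversed extensions: the walk lowercases one character at a time, dies as soon as the accumulated reversed suffix is no prefix of any reversed extension, and accepts on a full match, reporting how many characters to cut.
import Mathlib
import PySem

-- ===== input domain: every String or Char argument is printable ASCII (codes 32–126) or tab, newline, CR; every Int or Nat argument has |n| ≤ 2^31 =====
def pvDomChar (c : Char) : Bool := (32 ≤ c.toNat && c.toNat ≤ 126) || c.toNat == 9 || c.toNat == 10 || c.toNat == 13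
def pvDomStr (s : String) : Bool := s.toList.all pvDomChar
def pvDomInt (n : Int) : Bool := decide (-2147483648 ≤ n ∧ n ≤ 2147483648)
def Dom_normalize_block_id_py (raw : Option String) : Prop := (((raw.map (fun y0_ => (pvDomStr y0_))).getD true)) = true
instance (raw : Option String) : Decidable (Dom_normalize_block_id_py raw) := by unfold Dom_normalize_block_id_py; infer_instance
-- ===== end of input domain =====

-- B replaces A's loop of four endswith tests by one right-to-left character scan
-- driven by a precomputed prefix set of the reversed extensions (alternative).

-- ===== PORT A =====
-- A's for-loop over the four dotted extensions: strip the first match and break.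
def pvStripExtA (s : List Char) : List (List Char) → List Char
  | [] => s
  | e :: rest =>
    if PySem.Chars.endswith (PySem.Chars.lower s) e then
      PySem.List.slice s none (some (-(PySem.List.len e)))   -- s[:-len(ext)]
    else pvStripExtA s rest

def normalize_block_id_py (raw : Option String) : String :=
  match raw with
  | none => ""                                                -- "if not raw"
  | some r =>
    if r = "" then ""
    else
      let s0 := PySem.Chars.strip r.toList
      let s1 := if PySem.Chars.startswith s0 "block_".toList
                then PySem.List.slice s0 (some 6) none else s0   -- s[6:]
      String.ofList (pvStripExtA s1 [".png".toList, ".jpg".toList, ".jpeg".toList, ".webp".toList])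

-- ===== PORT B =====
-- _REV_EXTS: the four dotted extensions, reversed
def pvRevExts : List (List Char) :=
  ["png".toList, "jpg".toList, "jpeg".toList, "webp".toList].map (fun e => ('.' :: e).reverse)
-- _PREFIXES: every nonempty prefix of a reversed extension
def pvPrefixes : List (List Char) :=
  pvRevExts.flatMap (fun e => (List.range e.length).map (fun k => e.take (k + 1)))

-- _scan(p, rev): walk the reversed string through the prefix set; some k = matched length
def pvScan (p rev : List Char) : Option Nat :=
  match rev with
  | [] => none
  | c :: rest =>
    let p2 := p ++ [PySem.Chars.lowerChar c]
    if p2 ∈ pvPrefixes then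
      if p2 ∈ pvRevExts then some p2.length
      else pvScan p2 rest
    else none

def normalize_block_id_py_alt (raw : Option String) : String :=
  match raw with
  | none => ""
  | some r =>
    if r = "" then ""
    else
      let s0 := PySem.Chars.strip r.toList
      let s := if PySem.Chars.startswith s0 "block_".toList
               then PySem.List.slice s0 (some 6) none else s0   -- s[6:]
      String.ofList (match pvScan [] s.reverse with
        | none => s
        | some k => PySem.List.slice s none (some (PySem.List.len s - (k : Int))))  -- s[:len(s)-k]

-- ===== PRECONDITION & SPEC =====
def Spec_normalize_block_id_py (raw : Option String) (out : String) : Prop := out = normalize_block_id_py_alt raw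
instance (raw : Option String) (out : String) : Decidable (Spec_normalize_block_id_py raw out) := by unfold Spec_normalize_block_id_py; infer_instance

-- ===== CLAIM (what is proved, stated in full; the proofs are below) =====
def Claim_equal_normalize_block_id_py : Prop := ∀ (raw : Option String), Dom_normalize_block_id_py raw → Spec_normalize_block_id_py raw (normalize_block_id_py raw)

-- ===== LEMMAS AND PROOFS =====

-- proof-side helper: split a list at its LAST '.' (Python rpartition); used only to
-- characterize both ports, not by either port.
def pvRpartDot : List Char → Option (List Char × List Char)
  | [] => none
  | c :: cs =>
    match pvRpartDot cs with
    | some (st, ex) => some (c :: st, ex)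
    | none => if c = '.' then some ([], cs) else none

theorem pv_lowerChar_dot_iff (c : Char) : PySem.Chars.lowerChar c = '.' ↔ c = '.' := by
  unfold PySem.Chars.lowerChar
  split_ifs with h
  · simp [PySem.Chars.isupper] at h
    obtain ⟨h1, h2⟩ := h
    have hb : 65 ≤ c.toNat ∧ c.toNat ≤ 90 := ⟨h1, h2⟩
    constructor
    · intro hc
      have h3 : (Char.ofNat (c.toNat + 32)).toNat = 46 := by rw [hc]; rfl
      have h4 : (Char.ofNat (c.toNat + 32)).toNat = c.toNat + 32 := by
        unfold Char.ofNat
        split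
        · rfl
        · exact absurd (Or.inl (by omega) : (c.toNat + 32).isValidChar) (by assumption)
      omega
    · intro hc
      subst hc
      exact absurd hb (by decide)
  · exact Iff.rfl

theorem pv_mem_lower_dot (l : List Char) : '.' ∈ PySem.Chars.lower l ↔ '.' ∈ l := by
  show '.' ∈ l.map PySem.Chars.lowerChar ↔ _
  simp only [List.mem_map]
  constructor
  · rintro ⟨a, ha, hae⟩; rwa [(pv_lowerChar_dot_iff a).mp hae] at ha
  · intro h; exact ⟨'.', h, (pv_lowerChar_dot_iff '.').mpr rfl⟩

theorem pv_rpartDot_none (s : List Char) (h : pvRpartDot s = none) : '.' ∉ s := by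
  induction s with
  | nil => simp
  | cons c cs ih =>
    simp only [pvRpartDot] at h
    cases hcs : pvRpartDot cs with
    | some p => rw [hcs] at h; simp at h
    | none =>
      rw [hcs] at h
      split_ifs at h with hc
      intro hm
      rcases List.mem_cons.mp hm with h1 | h2
      · exact hc h1.symm
      · exact ih hcs h2

theorem pv_rpartDot_some (s st ex : List Char) (h : pvRpartDot s = some (st, ex)) :
    s = st ++ '.' :: ex ∧ '.' ∉ ex := by
  induction s generalizing st with
  | nil => simp [pvRpartDot] at h
  | cons c cs ih =>
    simp only [pvRpartDot] at h
    cases hcs : pvRpartDot cs with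
    | some p =>
      obtain ⟨st', ex'⟩ := p
      rw [hcs] at h
      simp only [Option.some.injEq, Prod.mk.injEq] at h
      obtain ⟨h1, h2⟩ := h
      subst h2
      obtain ⟨hs', hex'⟩ := ih st' hcs
      constructor
      · rw [← h1, hs']; rfl
      · exact hex'
    | none =>
      rw [hcs] at h
      split_ifs at h with hc
      simp only [Option.some.injEq, Prod.mk.injEq] at h
      obtain ⟨h1, h2⟩ := h
      constructor
      · rw [← h1, ← h2, hc]; rfl
      · rw [← h2]; exact pv_rpartDot_none cs hcs

theorem pv_suffix_dot_iff (e ex st : List Char) (he : '.' ∉ e) (hex : '.' ∉ ex) :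
    ('.' :: e) <:+ (st ++ '.' :: ex) ↔ e = ex := by
  constructor
  · intro h
    have h2 : ('.' :: ex) <:+ (st ++ '.' :: ex) := List.suffix_append st _
    rcases Nat.le_total ('.' :: e).length ('.' :: ex).length with hle | hle
    · have h3 := List.suffix_of_suffix_length_le h h2 hle
      rcases List.suffix_cons_iff.mp h3 with h4 | h4
      · exact (List.cons_eq_cons.mp h4).2
      · exact absurd (h4.subset (by simp)) hex
    · have h3 := List.suffix_of_suffix_length_le h2 h hle
      rcases List.suffix_cons_iff.mp h3 with h4 | h4
      · exact ((List.cons_eq_cons.mp h4).2).symm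
      · exact absurd (h4.subset (by simp)) he
  · intro h; subst h; exact List.suffix_append st _

theorem pv_not_endswith_no_dot (s e : List Char) (hdot : '.' ∉ s) :
    ¬ (PySem.Chars.endswith (PySem.Chars.lower s) ('.' :: e) = true) := by
  intro hc
  have h1 := (PySem.Chars.endswith_iff _ _).mp hc
  have h2 : '.' ∈ PySem.Chars.lower s := h1.subset (by simp)
  exact hdot ((pv_mem_lower_dot s).mp h2)

theorem pv_lower_append_dot (st ex : List Char) :
    PySem.Chars.lower (st ++ '.' :: ex) =
      PySem.Chars.lower st ++ '.' :: PySem.Chars.lower ex := by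
  show (st ++ '.' :: ex).map _ = st.map _ ++ '.' :: ex.map _
  simp only [List.map_append, List.map_cons]
  rfl

theorem pv_endswith_ext_iff (st ex e : List Char) (hex : '.' ∉ ex) (he : '.' ∉ e) :
    PySem.Chars.endswith (PySem.Chars.lower (st ++ '.' :: ex)) ('.' :: e) = true ↔
      e = PySem.Chars.lower ex := by
  rw [PySem.Chars.endswith_iff, pv_lower_append_dot]
  exact pv_suffix_dot_iff e (PySem.Chars.lower ex) (PySem.Chars.lower st) he
    (fun hm => hex ((pv_mem_lower_dot ex).mp hm))

theorem pv_take_left_ext (st ex : List Char) (k : Nat) (hk : ex.length + 1 = k) :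
    (st ++ '.' :: ex).take ((st ++ '.' :: ex).length - k) = st := by
  have h1 : (st ++ '.' :: ex).length = st.length + k := by
    simp [List.length_append]; omega
  rw [h1, Nat.add_sub_cancel]
  exact List.take_left

-- A-side characterization: the endswith loop computed through pvRpartDot
theorem pv_core (s : List Char) :
    pvStripExtA s [".png".toList, ".jpg".toList, ".jpeg".toList, ".webp".toList] =
      (match pvRpartDot s with
       | some (st, ex) =>
         if PySem.Chars.lower ex ∈ ["png".toList, "jpg".toList, "jpeg".toList, "webp".toList]
         then st else s
       | none => s) := by
  cases h : pvRpartDot s with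
  | none =>
    have hdot := pv_rpartDot_none s h
    simp only [pvStripExtA]
    rw [show ".png".toList = '.' :: "png".toList from rfl,
        show ".jpg".toList = '.' :: "jpg".toList from rfl,
        show ".jpeg".toList = '.' :: "jpeg".toList from rfl,
        show ".webp".toList = '.' :: "webp".toList from rfl]
    rw [if_neg (pv_not_endswith_no_dot s "png".toList hdot),
        if_neg (pv_not_endswith_no_dot s "jpg".toList hdot),
        if_neg (pv_not_endswith_no_dot s "jpeg".toList hdot),
        if_neg (pv_not_endswith_no_dot s "webp".toList hdot)]
  | some p =>
    obtain ⟨st, ex⟩ := p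
    obtain ⟨hs, hex⟩ := pv_rpartDot_some s st ex h
    subst hs
    have hlen : ex.length = (PySem.Chars.lower ex).length := by
      show ex.length = (ex.map PySem.Chars.lowerChar).length; simp
    rw [show ".png".toList = '.' :: "png".toList from rfl,
        show ".jpg".toList = '.' :: "jpg".toList from rfl,
        show ".jpeg".toList = '.' :: "jpeg".toList from rfl,
        show ".webp".toList = '.' :: "webp".toList from rfl]
    by_cases h1 : PySem.Chars.lower ex = "png".toList
    · simp only [pvStripExtA]
      rw [if_pos ((pv_endswith_ext_iff st ex "png".toList hex (by decide)).mpr h1.symm)]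
      rw [show PySem.List.slice (st ++ '.' :: ex) none (some (-(PySem.List.len ('.' :: "png".toList))))
            = PySem.List.slice (st ++ '.' :: ex) none (some (-((4:Nat):Int))) from rfl]
      rw [PySem.List.slice_to_neg_natCast (st ++ '.' :: ex) 4 (by omega)]
      rw [pv_take_left_ext st ex 4 (by rw [hlen, h1]; rfl)]
      rw [if_pos (show PySem.Chars.lower ex ∈ ["png".toList, "jpg".toList, "jpeg".toList, "webp".toList] by rw [h1]; decide)]
    · by_cases h2 : PySem.Chars.lower ex = "jpg".toList
      · simp only [pvStripExtA]
        rw [if_neg (fun hc => h1 (((pv_endswith_ext_iff st ex "png".toList hex (by decide)).mp hc).symm))]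
        rw [if_pos ((pv_endswith_ext_iff st ex "jpg".toList hex (by decide)).mpr h2.symm)]
        rw [show PySem.List.slice (st ++ '.' :: ex) none (some (-(PySem.List.len ('.' :: "jpg".toList))))
              = PySem.List.slice (st ++ '.' :: ex) none (some (-((4:Nat):Int))) from rfl]
        rw [PySem.List.slice_to_neg_natCast (st ++ '.' :: ex) 4 (by omega)]
        rw [pv_take_left_ext st ex 4 (by rw [hlen, h2]; rfl)]
        rw [if_pos (show PySem.Chars.lower ex ∈ ["png".toList, "jpg".toList, "jpeg".toList, "webp".toList] by rw [h2]; decide)]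
      · by_cases h3 : PySem.Chars.lower ex = "jpeg".toList
        · simp only [pvStripExtA]
          rw [if_neg (fun hc => h1 (((pv_endswith_ext_iff st ex "png".toList hex (by decide)).mp hc).symm))]
          rw [if_neg (fun hc => h2 (((pv_endswith_ext_iff st ex "jpg".toList hex (by decide)).mp hc).symm))]
          rw [if_pos ((pv_endswith_ext_iff st ex "jpeg".toList hex (by decide)).mpr h3.symm)]
          rw [show PySem.List.slice (st ++ '.' :: ex) none (some (-(PySem.List.len ('.' :: "jpeg".toList))))
                = PySem.List.slice (st ++ '.' :: ex) none (some (-((5:Nat):Int))) from rfl]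
          rw [PySem.List.slice_to_neg_natCast (st ++ '.' :: ex) 5 (by omega)]
          rw [pv_take_left_ext st ex 5 (by rw [hlen, h3]; rfl)]
          rw [if_pos (show PySem.Chars.lower ex ∈ ["png".toList, "jpg".toList, "jpeg".toList, "webp".toList] by rw [h3]; decide)]
        · by_cases h4 : PySem.Chars.lower ex = "webp".toList
          · simp only [pvStripExtA]
            rw [if_neg (fun hc => h1 (((pv_endswith_ext_iff st ex "png".toList hex (by decide)).mp hc).symm))]
            rw [if_neg (fun hc => h2 (((pv_endswith_ext_iff st ex "jpg".toList hex (by decide)).mp hc).symm))]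
            rw [if_neg (fun hc => h3 (((pv_endswith_ext_iff st ex "jpeg".toList hex (by decide)).mp hc).symm))]
            rw [if_pos ((pv_endswith_ext_iff st ex "webp".toList hex (by decide)).mpr h4.symm)]
            rw [show PySem.List.slice (st ++ '.' :: ex) none (some (-(PySem.List.len ('.' :: "webp".toList))))
                  = PySem.List.slice (st ++ '.' :: ex) none (some (-((5:Nat):Int))) from rfl]
            rw [PySem.List.slice_to_neg_natCast (st ++ '.' :: ex) 5 (by omega)]
            rw [pv_take_left_ext st ex 5 (by rw [hlen, h4]; rfl)]
            rw [if_pos (show PySem.Chars.lower ex ∈ ["png".toList, "jpg".toList, "jpeg".toList, "webp".toList] by rw [h4]; decide)]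
          · simp only [pvStripExtA]
            rw [if_neg (fun hc => h1 (((pv_endswith_ext_iff st ex "png".toList hex (by decide)).mp hc).symm))]
            rw [if_neg (fun hc => h2 (((pv_endswith_ext_iff st ex "jpg".toList hex (by decide)).mp hc).symm))]
            rw [if_neg (fun hc => h3 (((pv_endswith_ext_iff st ex "jpeg".toList hex (by decide)).mp hc).symm))]
            rw [if_neg (fun hc => h4 (((pv_endswith_ext_iff st ex "webp".toList hex (by decide)).mp hc).symm))]
            have hnm : PySem.Chars.lower ex ∉ ["png".toList, "jpg".toList, "jpeg".toList, "webp".toList] := by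
              intro hm
              simp only [List.mem_cons, List.not_mem_nil, or_false] at hm
              tauto
            rw [if_neg hnm]

-- ----- B-side lemmas -----

theorem pv_lower_def (l : List Char) : PySem.Chars.lower l = l.map PySem.Chars.lowerChar := rfl

theorem pv_exts_dot : ∀ e ∈ pvRevExts, '.' ∈ e := by decide

theorem pv_exts_no_prefix : ∀ e ∈ pvRevExts, ∀ f ∈ pvRevExts, e <+: f → e = f := by decide

theorem pv_prefix_mem (e l : List Char) (he : e ∈ pvRevExts) (hne : l ≠ []) (hl : l <+: e) :
    l ∈ pvPrefixes := by
  simp only [pvPrefixes, List.mem_flatMap, List.mem_map, List.mem_range]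
  refine ⟨e, he, l.length - 1, ?_, ?_⟩
  · have h1 := hl.length_le
    have h2 : 1 ≤ l.length := List.length_pos_iff.mpr hne
    omega
  · have h2 : 1 ≤ l.length := List.length_pos_iff.mpr hne
    rw [show l.length - 1 + 1 = l.length by omega]
    exact (List.prefix_iff_eq_take.mp hl).symm

-- soundness: a successful scan exhibits a reversed extension as prefix
theorem pv_scan_some (rev : List Char) : ∀ p k, pvScan p rev = some k →
    ∃ e ∈ pvRevExts, e <+: p ++ PySem.Chars.lower rev ∧ k = e.length := by
  induction rev with
  | nil => intro p k h; simp [pvScan] at h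
  | cons c rest ih =>
    intro p k h
    simp only [pvScan] at h
    split_ifs at h with h1 h2
    · -- accepted: p ++ [lowerChar c] ∈ pvRevExts
      refine ⟨p ++ [PySem.Chars.lowerChar c], h2, ?_, by simpa using h.symm⟩
      rw [pv_lower_def, List.map_cons]
      exact ⟨PySem.Chars.lower rest, by simp [pv_lower_def]⟩
    · obtain ⟨e, he, hpre, hk⟩ := ih (p ++ [PySem.Chars.lowerChar c]) k h
      refine ⟨e, he, ?_, hk⟩
      rw [pv_lower_def, List.map_cons]
      simpa using hpre

-- completeness: if a reversed extension is a prefix, the scan finds it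
theorem pv_scan_complete (rev : List Char) : ∀ p e, e ∈ pvRevExts → p <+: e → p ≠ e →
    e <+: p ++ PySem.Chars.lower rev → pvScan p rev = some e.length := by
  induction rev with
  | nil =>
    intro p e he hpe hne hep
    exfalso
    rw [pv_lower_def] at hep
    simp only [List.map_nil, List.append_nil] at hep
    exact hne (hpe.eq_of_length_le hep.length_le)
  | cons c rest ih =>
    intro p e he hpe hne hep
    rw [pv_lower_def, List.map_cons] at hep
    have hplen : p.length < e.length := by
      rcases Nat.lt_or_ge p.length e.length with h | h
      · exact h
      · exact absurd (hpe.eq_of_length_le h) hne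
    have h2 : (p ++ [PySem.Chars.lowerChar c]) <+: e := by
      have hpp : (p ++ [PySem.Chars.lowerChar c]) <+: p ++ PySem.Chars.lowerChar c :: PySem.Chars.lower rest := by
        refine ⟨PySem.Chars.lower rest, ?_⟩
        simp [pv_lower_def]
      refine List.prefix_of_prefix_length_le hpp hep ?_
      simp only [List.length_append, List.length_cons, List.length_nil]
      omega
    have hmem : (p ++ [PySem.Chars.lowerChar c]) ∈ pvPrefixes :=
      pv_prefix_mem e _ he (by simp) h2
    simp only [pvScan]
    rw [if_pos hmem]
    by_cases heq : p ++ [PySem.Chars.lowerChar c] = e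
    · rw [if_pos (heq ▸ he), heq]
    · have hni : (p ++ [PySem.Chars.lowerChar c]) ∉ pvRevExts := by
        intro hmem2
        exact heq (pv_exts_no_prefix _ hmem2 e he h2)
      rw [if_neg hni]
      refine ih _ e he h2 heq ?_
      have : e <+: (p ++ [PySem.Chars.lowerChar c]) ++ PySem.Chars.lower rest := by
        simpa using hep
      exact this
  
-- B-side characterization: the scan computed through pvRpartDot
theorem pv_coreB (s : List Char) :
    (match pvScan [] s.reverse with
     | none => s
     | some k => PySem.List.slice s none (some (PySem.List.len s - (k : Int)))) =
      (match pvRpartDot s with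
       | some (st, ex) =>
         if PySem.Chars.lower ex ∈ ["png".toList, "jpg".toList, "jpeg".toList, "webp".toList]
         then st else s
       | none => s) := by
  have hrevlow : PySem.Chars.lower s.reverse = (PySem.Chars.lower s).reverse := by
    rw [pv_lower_def, pv_lower_def, List.map_reverse]
  cases hrp : pvRpartDot s with
  | none =>
    have hdot := pv_rpartDot_none s hrp
    cases hscan : pvScan [] s.reverse with
    | none => rfl
    | some k =>
      exfalso
      obtain ⟨e, he, hpre, _⟩ := pv_scan_some s.reverse [] k hscan
      rw [List.nil_append, hrevlow] at hpre
      have hde : '.' ∈ e := pv_exts_dot e he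
      have : '.' ∈ (PySem.Chars.lower s).reverse := hpre.subset hde
      rw [List.mem_reverse] at this
      exact hdot ((pv_mem_lower_dot s).mp this)
  | some p =>
    obtain ⟨st, ex⟩ := p
    obtain ⟨hs, hex⟩ := pv_rpartDot_some s st ex hrp
    have hexlow : '.' ∉ PySem.Chars.lower ex := fun hm => hex ((pv_mem_lower_dot ex).mp hm)
    have hlen : (PySem.Chars.lower ex).length = ex.length := by
      rw [pv_lower_def]; simp
    show _ = if PySem.Chars.lower ex ∈ ["png".toList, "jpg".toList, "jpeg".toList, "webp".toList] then st else s
    by_cases hm : PySem.Chars.lower ex ∈ ["png".toList, "jpg".toList, "jpeg".toList, "webp".toList]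
    · rw [if_pos hm]
      -- the matching reversed extension
      have hkey : pvScan [] s.reverse = some (ex.length + 1) := by
        have hee : ('.' :: PySem.Chars.lower ex).reverse ∈ pvRevExts := by
          simp only [List.mem_cons, List.not_mem_nil, or_false] at hm
          rcases hm with h | h | h | h <;> rw [h] <;> decide
        have hlenE : ('.' :: PySem.Chars.lower ex).reverse.length = ex.length + 1 := by
          simp [hlen]
        have hprefix : ('.' :: PySem.Chars.lower ex).reverse <+: [] ++ PySem.Chars.lower s.reverse := by
          rw [List.nil_append, hrevlow, hs, pv_lower_append_dot, List.reverse_append]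
          exact List.prefix_append _ _
        have := pv_scan_complete s.reverse [] (('.' :: PySem.Chars.lower ex).reverse) hee
          (List.nil_prefix) (by simp) hprefix
        rw [this, hlenE]
      rw [hkey]
      show PySem.List.slice s none (some (PySem.List.len s - ((ex.length + 1 : Nat) : Int))) = st
      have hsl : s.length = st.length + ex.length + 1 := by
        rw [hs]; simp [List.length_append]; omega
      have hnn : (0:Int) ≤ PySem.List.len s - ((ex.length + 1 : Nat) : Int) := by
        show (0:Int) ≤ (s.length : Int) - _
        push_cast [hsl]; omega
      rw [PySem.List.slice_to _ hnn]
      have htn : ((PySem.List.len s - ((ex.length + 1 : Nat) : Int))).toNat = s.length - (ex.length + 1) := by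
        show (((s.length:Int) - _)).toNat = _
        omega
      rw [htn, hs, pv_take_left_ext st ex (ex.length + 1) rfl]
    · rw [if_neg hm]
      cases hscan : pvScan [] s.reverse with
      | none => rfl
      | some k =>
        exfalso
        obtain ⟨e, he, hpre, _⟩ := pv_scan_some s.reverse [] k hscan
        rw [List.nil_append, hrevlow] at hpre
        have hsuf : e.reverse <:+ PySem.Chars.lower s := by
          have : e.reverse.reverse <+: (PySem.Chars.lower s).reverse := by simpa using hpre
          exact List.reverse_prefix.mp this
        rw [hs, pv_lower_append_dot] at hsuf
        simp only [pvRevExts, List.mem_map, List.mem_cons, List.not_mem_nil, or_false] at he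
        obtain ⟨b, hb, hbe⟩ := he
        have hrev : e.reverse = '.' :: b := by rw [← hbe]; simp
        rw [hrev] at hsuf
        have hbnd : '.' ∉ b := by
          rcases hb with h | h | h | h <;> rw [h] <;> decide
        have := (pv_suffix_dot_iff b (PySem.Chars.lower ex) (PySem.Chars.lower st) hbnd hexlow).mp hsuf
        apply hm
        rw [← this]
        rcases hb with h | h | h | h <;> rw [h] <;> simp

-- ===== VERDICT (by name: the statement is the Claim_ definition above) =====
theorem normalize_block_id_py_spec : Claim_equal_normalize_block_id_py := by
  intro raw _
  show normalize_block_id_py raw = normalize_block_id_py_alt raw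
  cases raw with
  | none => rfl
  | some r =>
    simp only [normalize_block_id_py, normalize_block_id_py_alt]
    by_cases hr : r = ""
    · simp [hr]
    · rw [if_neg hr, if_neg hr]
      exact congrArg String.ofList ((pv_core _).trans (pv_coreB _).symm)
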